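-- pv_equiv track=rewrite | github.com/whitepaper2/algoDiary | algo-challenge/4.2.1-gameWin.py | eulidGame
-- ===== SOURCE A (Python) =====
-- def eulidGame(a, b):
--     """
--     较大的数字减去较小数字的倍数
--     b-a>a:可选a的倍数,存在两种情况，1整除，Alice赢；2不能整除
--     b-a<a:没的选择
--     """
--     res = True
--     while True:
--         if a > b:
--             a, b = b, a
--         if b % a == 0:
--             break
--         if b - a > a:
--             break
--         b -= a
--         res = not res
--     return res
-- ===== SOURCE B (Python) =====
-- def eulidGame(a, b):
--     # Recursive solver: normalize so a <= b; a winning move exists iff a divides b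
--     # or the quotient is at least 2; otherwise the single forced move flips the winner.
--     if a > b:
--         return eulidGame(b, a)
--     if b % a == 0 or b > 2 * a:
--         return True
--     return not eulidGame(b - a, a)
-- ===== Notes on version B (the rewrite author's own statement) =====
-- stated objective: simpler
-- what changed: Replaces the while-loop with a mutated (a,b,res) state and an explicit parity flag by a direct recursive game-theoretic solver that normalizes via a recursive swap call and flips the result with `not` at each forced move.
import Mathlib
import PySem

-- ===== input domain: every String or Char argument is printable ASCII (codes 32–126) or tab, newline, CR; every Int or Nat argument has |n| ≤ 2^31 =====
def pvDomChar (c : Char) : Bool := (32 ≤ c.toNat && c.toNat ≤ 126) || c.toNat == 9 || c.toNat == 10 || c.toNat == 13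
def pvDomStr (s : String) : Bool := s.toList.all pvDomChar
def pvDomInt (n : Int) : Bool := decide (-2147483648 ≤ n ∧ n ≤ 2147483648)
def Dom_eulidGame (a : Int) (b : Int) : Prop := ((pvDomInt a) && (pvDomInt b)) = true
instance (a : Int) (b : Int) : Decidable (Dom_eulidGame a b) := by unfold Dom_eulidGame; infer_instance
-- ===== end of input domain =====

-- B replaces A's while-loop with a mutated parity flag by a direct recursive solver; objective: simpler.

-- ===== PORT A =====
-- the while-loop body, fueled (fuel a.natAbs+b.natAbs+1 always suffices: each
-- non-breaking iteration decreases the measure); fuel 0 is never reached on Pre_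
def eulidGameLoop : Nat → Int → Int → Bool → Bool
  | 0, _, _, res => res
  | n+1, a, b, res =>
    let p := if a > b then (b, a) else (a, b)
    if PySem.Int.mod p.2 p.1 = 0 then res
    else if p.2 - p.1 > p.1 then res
    else eulidGameLoop n p.1 (p.2 - p.1) (!res)

def eulidGame (a : Int) (b : Int) : Bool :=
  eulidGameLoop (a.natAbs + b.natAbs + 1) a b true

-- ===== PORT B =====
-- recursive solver from Source B, fueled (2*(a.natAbs+b.natAbs)+2 always suffices)
def eulidGameAltGo : Nat → Int → Int → Bool
  | 0, _, _ => true
  | n+1, a, b =>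
    if a > b then eulidGameAltGo n b a
    else if PySem.Int.mod b a = 0 ∨ b > 2 * a then true
    else !(eulidGameAltGo n (b - a) a)

def eulidGame_alt (a : Int) (b : Int) : Bool :=
  eulidGameAltGo (2 * (a.natAbs + b.natAbs) + 2) a b

-- ===== PRECONDITION & SPEC =====
-- A (and B) raise ZeroDivisionError exactly when min(a,b) = 0; Pre_ excludes only that.
def Pre_eulidGame (a : Int) (b : Int) : Prop := min a b ≠ 0
instance (a : Int) (b : Int) : Decidable (Pre_eulidGame a b) := by unfold Pre_eulidGame; infer_instance
def pvWitness_eulidGame : Int × Int := (3, 5)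

def Spec_eulidGame (a : Int) (b : Int) (out : Bool) : Prop := out = eulidGame_alt a b
instance (a : Int) (b : Int) (out : Bool) : Decidable (Spec_eulidGame a b out) := by unfold Spec_eulidGame; infer_instance

-- ===== CLAIM (what is proved, stated in full; the proofs are below) =====
def Claim_equal_eulidGame : Prop := ∀ (a : Int) (b : Int), Dom_eulidGame a b → Pre_eulidGame a b → Spec_eulidGame a b (eulidGame a b)

-- ===== LEMMAS AND PROOFS =====

lemma boolFlip (r g : Bool) : ((!r) == g) = (r == (!g)) := by cases r <;> cases g <;> rfl

-- the heart: after normalization x ≤ y, the loop body and the recursive body agree,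
-- given the induction hypothesis for smaller measures
lemma keyCore (k n₀ m₀ : Nat) (x y : Int) (res : Bool)
    (ih : ∀ k', k' < k → ∀ (a b : Int) (res : Bool) (n m : Nat),
      min a b ≠ 0 → a.natAbs + b.natAbs ≤ k' → k' + 1 ≤ n → 2 * k' + 2 ≤ m →
      eulidGameLoop n a b res = (res == eulidGameAltGo m a b))
    (hx : x ≠ 0) (hxy : x ≤ y) (hk : x.natAbs + y.natAbs ≤ k)
    (hn : k ≤ n₀) (hm : 2 * k ≤ m₀) :
    (if PySem.Int.mod y x = 0 then res
     else if y - x > x then res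
     else eulidGameLoop n₀ x (y - x) (!res))
    = (res == (if PySem.Int.mod y x = 0 ∨ y > 2 * x then true
               else !(eulidGameAltGo m₀ (y - x) x))) := by
  by_cases hdvd : PySem.Int.mod y x = 0
  · simp [hdvd]
  · by_cases hgt : y - x > x
    · have : y > 2 * x := by omega
      simp [hdvd, hgt, this]
    · have hnd : ¬ (x ∣ y) := by
        intro h; exact hdvd ((PySem.Int.mod_eq_zero_iff_dvd y x).mpr h)
      have hne1 : y ≠ x := by rintro rfl; exact hnd dvd_rfl
      have hne2 : y ≠ 2 * x := by intro hy; exact hnd (hy ▸ dvd_mul_left x 2)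
      have hx1 : 1 ≤ x := by omega
      have hlt : y - x < x := by omega
      have hylt : x < y := by omega
      have hgt2 : ¬ y > 2 * x := by omega
      have hk' : x.natAbs + (y - x).natAbs < k := by omega
      obtain ⟨m₀', rfl⟩ : ∃ m', m₀ = m' + 1 := ⟨m₀ - 1, by omega⟩
      have step := ih (x.natAbs + (y - x).natAbs) hk' x (y - x) (!res) n₀ (m₀' + 2)
        (by omega) le_rfl (by omega) (by omega)
      simp only [hdvd, hgt, hgt2, if_false, or_false, step]
      have hswap : eulidGameAltGo (m₀' + 2) x (y - x)
          = eulidGameAltGo (m₀' + 1) (y - x) x := by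
        have : x > y - x := hlt
        simp [eulidGameAltGo, this]
      rw [hswap]; exact boolFlip res (eulidGameAltGo (m₀' + 1) (y - x) x)

lemma key : ∀ (k : Nat) (a b : Int) (res : Bool) (n m : Nat),
    min a b ≠ 0 → a.natAbs + b.natAbs ≤ k → k + 1 ≤ n → 2 * k + 2 ≤ m →
    eulidGameLoop n a b res = (res == eulidGameAltGo m a b) := by
  intro k
  induction k using Nat.strong_induction_on with
  | _ k ih =>
    intro a b res n m hmin hk hn hm
    obtain ⟨n', rfl⟩ : ∃ n', n = n' + 1 := ⟨n - 1, by omega⟩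
    obtain ⟨m', rfl⟩ : ∃ m', m = m' + 1 := ⟨m - 1, by omega⟩
    by_cases hab : a > b
    · -- A swaps inline; B recurses once to swap
      obtain ⟨m'', rfl⟩ : ∃ m'', m' = m'' + 1 := ⟨m' - 1, by omega⟩
      have hb : b ≠ 0 := by simp only [min_def] at hmin; omega
      have hswap : eulidGameAltGo (m'' + 2) a b = eulidGameAltGo (m'' + 1) b a := by
        simp [eulidGameAltGo, hab]
      have hnswap : ¬ b > a := by omega
      rw [hswap]
      simp only [eulidGameLoop, eulidGameAltGo, hab, hnswap, if_true, if_false]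
      exact keyCore k n' m'' b a res ih hb (by omega) (by omega) (by omega) (by omega)
    · have ha : a ≠ 0 := by simp only [min_def] at hmin; omega
      simp only [eulidGameLoop, eulidGameAltGo, hab, if_false]
      exact keyCore k n' m' a b res ih ha (by omega) (by omega) (by omega) (by omega)

-- ===== VERDICT (by name: the statement is the Claim_ definition above) =====
theorem eulidGame_spec : Claim_equal_eulidGame := by
  intro a b _hdom hpre
  unfold Spec_eulidGame eulidGame eulidGame_alt
  rw [key (a.natAbs + b.natAbs) a b true (a.natAbs + b.natAbs + 1)
      (2 * (a.natAbs + b.natAbs) + 2) hpre le_rfl le_rfl le_rfl]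
  cases eulidGameAltGo (2 * (a.natAbs + b.natAbs) + 2) a b <;> rfl
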